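-- pv_equiv track=rewrite | github.com/guillemp/django-forum | forum/main/utils.py | emojis
-- ===== SOURCE A (Python) =====
-- def emojis(content):
--     smilies = [
--         [1,":D","grinning.png","Very Happy"],
--         [2,":-D","grinning.png","Very Happy"],
--         [3,":grin:","grinning.png","Very Happy"],
--         [4,":)","grinning.png","Smile"],
--         [5,":-)","grinning.png","Smile"],
--         [6,":smile:","grinning.png","Smile"],
--         [7,":(","icon_sad.gif","Sad"],
--         [8,":-(","icon_sad.gif","Sad"],
--         [9,":sad:","icon_sad.gif","Sad"],
--         [10,":o","open_mouth.png","Surprised"],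
--         [11,":-o","open_mouth.png","Surprised"],
--         [12,":eek:","icon_surprised.gif","Surprised"],
--         [13,":shock:","flushed.png","Shocked"],
--         [14,":?","confused.png","Confused"],
--         [15,":-?","confused.png","Confused"],
--         [16,":???:","confused.png","Confused"],
--         [17,"8)","sunglasses.png","Cool"],
--         [18,"8-)","sunglasses.png","Cool"],
--         [19,":cool:","sunglasses.png","Cool"],
--         [20,":lol:","satisfied.png","Laughing"],
--         [21,":x","icon_mad.gif","Mad"],
--         [22,":-x","icon_mad.gif","Mad"],
--         [23,":mad:","icon_mad.gif","Mad"],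
--         [24,":P","stuck_out_tongue.png","Razz"],
--         [25,":-P","stuck_out_tongue.png","Razz"],
--         [26,":razz:","stuck_out_tongue.png","Razz"],
--         [27,":oops:","icon_redface.gif","Embarassed"],
--         [28,":cry:","cry.png","Cry"],
--         [29,":evil:","imp.png","Evil"],
--         [30,":twisted:","imp.png","Twisted Evil"],
--         [31,":roll:","relieved.png","Relieved"],
--         [32,":wink:","wink.png","Wink"],
--         [33,";)","wink.png","Wink"],
--         [34,";-)","wink.png","Wink"],
--         [35,":!:","exclamation.png","Exclamation"],
--         [36,":?:","question.png","Question"],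
--         [37,":idea:","icon_idea.gif","Idea"],
--         [38,":arrow:","icon_arrow.gif","Arrow"],
--         [39,":|","icon_neutral.gif","Neutral"],
--         [40,":-|","icon_neutral.gif","Neutral"],
--         [41,":neutral:","icon_neutral.gif","Neutral"],
--         [42,":mrgreen:","grin.png","Mr. Green"],
--         [43,":-#","no_mouth.png","Silenced"],
--         [44,":-s","eusa_eh.gif","Eh?"],
--         [45,":aiwebs_001:","aiwebs_001.gif","aiwebs_001"],
--         [46,":aiwebs_002:","aiwebs_002.gif","aiwebs_002"],
--         [47,":aiwebs_003:","disappointed.png","Disappointed"],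
--         [48,":aiwebs_004:","blush.png","Blush"],
--         [49,":aiwebs_005:","aiwebs_005.gif","aiwebs_005"],
--         [50,":aiwebs_006:","aiwebs_006.gif","aiwebs_006"],
--         [51,":aiwebs_007:","aiwebs_007.gif","aiwebs_007"],
--         [52,":aiwebs_008:","aiwebs_008.gif","aiwebs_008"],
--         [53,":aiwebs_009:","aiwebs_009.gif","aiwebs_009"],
--         [54,":aiwebs_010:","flushed.png","Flushed"],
--         [55,":aiwebs_011:","grin.png","Grin"],
--         [56,":aiwebs_012:","aiwebs_012.gif","aiwebs_012"],
--         [57,":aiwebs_014:","relieved.png","Relieved"],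
--         [58,":aiwebs_015:","aiwebs_015.gif","aiwebs_015"],
--         [59,":aiwebs_016:","anguished.png","Anguished"],
--         [60,":aiwebs_017:","smile.png","Smile"],
--         [61,":aiwebs_018:","triumph.png","Triumph"],
--         [62,":aiwebs_019:","aiwebs_019.gif","aiwebs_019"],
--         [63,":aiwebs_020:","aiwebs_020.gif","aiwebs_020"],
--         [64,":aiwebs_021:","aiwebs_021.gif","aiwebs_021"],
--         [65,":aiwebs_022:","relaxed.png","Relaxed"],
--         [66,":aiwebs_023:","aiwebs_023.gif","aiwebs_023"],
--         [67,":aiwebs_024:","aiwebs_024.gif","aiwebs_024"],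
--         [68,":aiwebs_025:","aiwebs_025.gif","aiwebs_025"],
--         [69,":aiwebs_026:","aiwebs_026.gif","aiwebs_026"],
--         [70,":aiwebs_027:","aiwebs_027.gif","aiwebs_027"],
--         [71,":aiwebs_028:","laughing.png","Laughing"],
--         [72,":aiwebs_029:","confounded.png","Confounded"],
--         [73,":aiwebs_030:","aiwebs_030.gif","aiwebs_030"],
--         [74,":aiwebs_033:","innocent.png","Innocent.png"]
--     ]
--
--     for pack in smilies:
--         img_url = '<img src="/static/img/emojis/%s" class="emoji" alt="%s">' % (pack[2], pack[3])
--         content = content.replace(pack[1], img_url)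
--
--     return content
-- ===== SOURCE B (Python) =====
-- _SMILIES = [
--     ":D\tgrinning.png\tVery Happy",
--     ":-D\tgrinning.png\tVery Happy",
--     ":grin:\tgrinning.png\tVery Happy",
--     ":)\tgrinning.png\tSmile",
--     ":-)\tgrinning.png\tSmile",
--     ":smile:\tgrinning.png\tSmile",
--     ":(\ticon_sad.gif\tSad",
--     ":-(\ticon_sad.gif\tSad",
--     ":sad:\ticon_sad.gif\tSad",
--     ":o\topen_mouth.png\tSurprised",
--     ":-o\topen_mouth.png\tSurprised",
--     ":eek:\ticon_surprised.gif\tSurprised",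
--     ":shock:\tflushed.png\tShocked",
--     ":?\tconfused.png\tConfused",
--     ":-?\tconfused.png\tConfused",
--     ":???:\tconfused.png\tConfused",
--     "8)\tsunglasses.png\tCool",
--     "8-)\tsunglasses.png\tCool",
--     ":cool:\tsunglasses.png\tCool",
--     ":lol:\tsatisfied.png\tLaughing",
--     ":x\ticon_mad.gif\tMad",
--     ":-x\ticon_mad.gif\tMad",
--     ":mad:\ticon_mad.gif\tMad",
--     ":P\tstuck_out_tongue.png\tRazz",
--     ":-P\tstuck_out_tongue.png\tRazz",
--     ":razz:\tstuck_out_tongue.png\tRazz",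
--     ":oops:\ticon_redface.gif\tEmbarassed",
--     ":cry:\tcry.png\tCry",
--     ":evil:\timp.png\tEvil",
--     ":twisted:\timp.png\tTwisted Evil",
--     ":roll:\trelieved.png\tRelieved",
--     ":wink:\twink.png\tWink",
--     ";)\twink.png\tWink",
--     ";-)\twink.png\tWink",
--     ":!:\texclamation.png\tExclamation",
--     ":?:\tquestion.png\tQuestion",
--     ":idea:\ticon_idea.gif\tIdea",
--     ":arrow:\ticon_arrow.gif\tArrow",
--     ":|\ticon_neutral.gif\tNeutral",
--     ":-|\ticon_neutral.gif\tNeutral",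
--     ":neutral:\ticon_neutral.gif\tNeutral",
--     ":mrgreen:\tgrin.png\tMr. Green",
--     ":-#\tno_mouth.png\tSilenced",
--     ":-s\teusa_eh.gif\tEh?",
--     ":aiwebs_001:\taiwebs_001.gif\taiwebs_001",
--     ":aiwebs_002:\taiwebs_002.gif\taiwebs_002",
--     ":aiwebs_003:\tdisappointed.png\tDisappointed",
--     ":aiwebs_004:\tblush.png\tBlush",
--     ":aiwebs_005:\taiwebs_005.gif\taiwebs_005",
--     ":aiwebs_006:\taiwebs_006.gif\taiwebs_006",
--     ":aiwebs_007:\taiwebs_007.gif\taiwebs_007",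
--     ":aiwebs_008:\taiwebs_008.gif\taiwebs_008",
--     ":aiwebs_009:\taiwebs_009.gif\taiwebs_009",
--     ":aiwebs_010:\tflushed.png\tFlushed",
--     ":aiwebs_011:\tgrin.png\tGrin",
--     ":aiwebs_012:\taiwebs_012.gif\taiwebs_012",
--     ":aiwebs_014:\trelieved.png\tRelieved",
--     ":aiwebs_015:\taiwebs_015.gif\taiwebs_015",
--     ":aiwebs_016:\tanguished.png\tAnguished",
--     ":aiwebs_017:\tsmile.png\tSmile",
--     ":aiwebs_018:\ttriumph.png\tTriumph",
--     ":aiwebs_019:\taiwebs_019.gif\taiwebs_019",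
--     ":aiwebs_020:\taiwebs_020.gif\taiwebs_020",
--     ":aiwebs_021:\taiwebs_021.gif\taiwebs_021",
--     ":aiwebs_022:\trelaxed.png\tRelaxed",
--     ":aiwebs_023:\taiwebs_023.gif\taiwebs_023",
--     ":aiwebs_024:\taiwebs_024.gif\taiwebs_024",
--     ":aiwebs_025:\taiwebs_025.gif\taiwebs_025",
--     ":aiwebs_026:\taiwebs_026.gif\taiwebs_026",
--     ":aiwebs_027:\taiwebs_027.gif\taiwebs_027",
--     ":aiwebs_028:\tlaughing.png\tLaughing",
--     ":aiwebs_029:\tconfounded.png\tConfounded",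
--     ":aiwebs_030:\taiwebs_030.gif\taiwebs_030",
--     ":aiwebs_033:\tinnocent.png\tInnocent.png"
-- ]
--
--
-- def emojis(content):
--     # Segment list: already-inserted img tags are frozen and never rescanned;
--     # each code splits only the remaining raw text; one final join.
--     # The smiley data lives as compact tab-separated records, parsed per record.
--     segments = [(True, content)]
--     for rec in _SMILIES:
--         code, img_file, alt = rec.split("\t")
--         img = '<img src="/static/img/emojis/%s" class="emoji" alt="%s">' % (img_file, alt)
--         out = []
--         for raw, text in segments:
--             if raw:
--                 first = True
--                 for p in text.split(code):
--                     if not first: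
--                         out.append((False, img))
--                     out.append((True, p))
--                     first = False
--             else:
--                 out.append((raw, text))
--         segments = out
--     return ''.join(t for _, t in segments)
-- ===== Notes on version B (the rewrite author's own statement) =====
-- stated objective: alternative
-- what changed: B stores the smiley data as one flat tab-separated text table parsed line by line (instead of A's list-of-lists) and, instead of 74 full-string str.replace passes over an ever-growing string, keeps a segment list in which inserted img tags are frozen and never rescanned; each code only splits the remaining raw-text segments and the result is joined once at the end.
import Mathlib
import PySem

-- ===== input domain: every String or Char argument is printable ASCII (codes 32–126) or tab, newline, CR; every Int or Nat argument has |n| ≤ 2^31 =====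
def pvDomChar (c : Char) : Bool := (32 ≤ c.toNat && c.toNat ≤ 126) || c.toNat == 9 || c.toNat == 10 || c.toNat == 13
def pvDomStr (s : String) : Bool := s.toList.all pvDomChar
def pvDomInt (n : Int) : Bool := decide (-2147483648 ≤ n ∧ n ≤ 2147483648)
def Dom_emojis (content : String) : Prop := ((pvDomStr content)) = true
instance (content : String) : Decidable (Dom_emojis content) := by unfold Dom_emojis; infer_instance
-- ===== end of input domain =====

-- B replaces A's 74 sequential full-string replace passes (over a list-of-lists table) by a
-- segment list in which inserted img tags are frozen and never rescanned, driven by a flat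
-- table of tab-separated records parsed per record (alternative algorithm and data structure).

-- ===== PORT A =====
def emojisSmilies : List (Int × String × String × String) := [
  (1, ":D", "grinning.png", "Very Happy"),
  (2, ":-D", "grinning.png", "Very Happy"),
  (3, ":grin:", "grinning.png", "Very Happy"),
  (4, ":)", "grinning.png", "Smile"),
  (5, ":-)", "grinning.png", "Smile"),
  (6, ":smile:", "grinning.png", "Smile"),
  (7, ":(", "icon_sad.gif", "Sad"),
  (8, ":-(", "icon_sad.gif", "Sad"),
  (9, ":sad:", "icon_sad.gif", "Sad"),
  (10, ":o", "open_mouth.png", "Surprised"),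
  (11, ":-o", "open_mouth.png", "Surprised"),
  (12, ":eek:", "icon_surprised.gif", "Surprised"),
  (13, ":shock:", "flushed.png", "Shocked"),
  (14, ":?", "confused.png", "Confused"),
  (15, ":-?", "confused.png", "Confused"),
  (16, ":???:", "confused.png", "Confused"),
  (17, "8)", "sunglasses.png", "Cool"),
  (18, "8-)", "sunglasses.png", "Cool"),
  (19, ":cool:", "sunglasses.png", "Cool"),
  (20, ":lol:", "satisfied.png", "Laughing"),
  (21, ":x", "icon_mad.gif", "Mad"),
  (22, ":-x", "icon_mad.gif", "Mad"),
  (23, ":mad:", "icon_mad.gif", "Mad"),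
  (24, ":P", "stuck_out_tongue.png", "Razz"),
  (25, ":-P", "stuck_out_tongue.png", "Razz"),
  (26, ":razz:", "stuck_out_tongue.png", "Razz"),
  (27, ":oops:", "icon_redface.gif", "Embarassed"),
  (28, ":cry:", "cry.png", "Cry"),
  (29, ":evil:", "imp.png", "Evil"),
  (30, ":twisted:", "imp.png", "Twisted Evil"),
  (31, ":roll:", "relieved.png", "Relieved"),
  (32, ":wink:", "wink.png", "Wink"),
  (33, ";)", "wink.png", "Wink"),
  (34, ";-)", "wink.png", "Wink"),
  (35, ":!:", "exclamation.png", "Exclamation"),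
  (36, ":?:", "question.png", "Question"),
  (37, ":idea:", "icon_idea.gif", "Idea"),
  (38, ":arrow:", "icon_arrow.gif", "Arrow"),
  (39, ":|", "icon_neutral.gif", "Neutral"),
  (40, ":-|", "icon_neutral.gif", "Neutral"),
  (41, ":neutral:", "icon_neutral.gif", "Neutral"),
  (42, ":mrgreen:", "grin.png", "Mr. Green"),
  (43, ":-#", "no_mouth.png", "Silenced"),
  (44, ":-s", "eusa_eh.gif", "Eh?"),
  (45, ":aiwebs_001:", "aiwebs_001.gif", "aiwebs_001"),
  (46, ":aiwebs_002:", "aiwebs_002.gif", "aiwebs_002"),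
  (47, ":aiwebs_003:", "disappointed.png", "Disappointed"),
  (48, ":aiwebs_004:", "blush.png", "Blush"),
  (49, ":aiwebs_005:", "aiwebs_005.gif", "aiwebs_005"),
  (50, ":aiwebs_006:", "aiwebs_006.gif", "aiwebs_006"),
  (51, ":aiwebs_007:", "aiwebs_007.gif", "aiwebs_007"),
  (52, ":aiwebs_008:", "aiwebs_008.gif", "aiwebs_008"),
  (53, ":aiwebs_009:", "aiwebs_009.gif", "aiwebs_009"),
  (54, ":aiwebs_010:", "flushed.png", "Flushed"),
  (55, ":aiwebs_011:", "grin.png", "Grin"),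
  (56, ":aiwebs_012:", "aiwebs_012.gif", "aiwebs_012"),
  (57, ":aiwebs_014:", "relieved.png", "Relieved"),
  (58, ":aiwebs_015:", "aiwebs_015.gif", "aiwebs_015"),
  (59, ":aiwebs_016:", "anguished.png", "Anguished"),
  (60, ":aiwebs_017:", "smile.png", "Smile"),
  (61, ":aiwebs_018:", "triumph.png", "Triumph"),
  (62, ":aiwebs_019:", "aiwebs_019.gif", "aiwebs_019"),
  (63, ":aiwebs_020:", "aiwebs_020.gif", "aiwebs_020"),
  (64, ":aiwebs_021:", "aiwebs_021.gif", "aiwebs_021"),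
  (65, ":aiwebs_022:", "relaxed.png", "Relaxed"),
  (66, ":aiwebs_023:", "aiwebs_023.gif", "aiwebs_023"),
  (67, ":aiwebs_024:", "aiwebs_024.gif", "aiwebs_024"),
  (68, ":aiwebs_025:", "aiwebs_025.gif", "aiwebs_025"),
  (69, ":aiwebs_026:", "aiwebs_026.gif", "aiwebs_026"),
  (70, ":aiwebs_027:", "aiwebs_027.gif", "aiwebs_027"),
  (71, ":aiwebs_028:", "laughing.png", "Laughing"),
  (72, ":aiwebs_029:", "confounded.png", "Confounded"),
  (73, ":aiwebs_030:", "aiwebs_030.gif", "aiwebs_030"),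
  (74, ":aiwebs_033:", "innocent.png", "Innocent.png")]

def emojisImgUrl (fn al : String) : String :=
  "<img src=\"/static/img/emojis/" ++ fn ++ "\" class=\"emoji\" alt=\"" ++ al ++ "\">"

def emojis (content : String) : String :=
  emojisSmilies.foldl
    (fun c pack => PySem.Str.replace c pack.2.1 (emojisImgUrl pack.2.2.1 pack.2.2.2)) content

-- ===== PORT B =====
-- Source B's _SMILIES: compact tab-separated records, one string each
def emojisAltRecords : List String := [
  ":D\tgrinning.png\tVery Happy",
  ":-D\tgrinning.png\tVery Happy",
  ":grin:\tgrinning.png\tVery Happy",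
  ":)\tgrinning.png\tSmile",
  ":-)\tgrinning.png\tSmile",
  ":smile:\tgrinning.png\tSmile",
  ":(\ticon_sad.gif\tSad",
  ":-(\ticon_sad.gif\tSad",
  ":sad:\ticon_sad.gif\tSad",
  ":o\topen_mouth.png\tSurprised",
  ":-o\topen_mouth.png\tSurprised",
  ":eek:\ticon_surprised.gif\tSurprised",
  ":shock:\tflushed.png\tShocked",
  ":?\tconfused.png\tConfused",
  ":-?\tconfused.png\tConfused",
  ":???:\tconfused.png\tConfused",
  "8)\tsunglasses.png\tCool",
  "8-)\tsunglasses.png\tCool",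
  ":cool:\tsunglasses.png\tCool",
  ":lol:\tsatisfied.png\tLaughing",
  ":x\ticon_mad.gif\tMad",
  ":-x\ticon_mad.gif\tMad",
  ":mad:\ticon_mad.gif\tMad",
  ":P\tstuck_out_tongue.png\tRazz",
  ":-P\tstuck_out_tongue.png\tRazz",
  ":razz:\tstuck_out_tongue.png\tRazz",
  ":oops:\ticon_redface.gif\tEmbarassed",
  ":cry:\tcry.png\tCry",
  ":evil:\timp.png\tEvil",
  ":twisted:\timp.png\tTwisted Evil",
  ":roll:\trelieved.png\tRelieved",
  ":wink:\twink.png\tWink",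
  ";)\twink.png\tWink",
  ";-)\twink.png\tWink",
  ":!:\texclamation.png\tExclamation",
  ":?:\tquestion.png\tQuestion",
  ":idea:\ticon_idea.gif\tIdea",
  ":arrow:\ticon_arrow.gif\tArrow",
  ":|\ticon_neutral.gif\tNeutral",
  ":-|\ticon_neutral.gif\tNeutral",
  ":neutral:\ticon_neutral.gif\tNeutral",
  ":mrgreen:\tgrin.png\tMr. Green",
  ":-#\tno_mouth.png\tSilenced",
  ":-s\teusa_eh.gif\tEh?",
  ":aiwebs_001:\taiwebs_001.gif\taiwebs_001",
  ":aiwebs_002:\taiwebs_002.gif\taiwebs_002",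
  ":aiwebs_003:\tdisappointed.png\tDisappointed",
  ":aiwebs_004:\tblush.png\tBlush",
  ":aiwebs_005:\taiwebs_005.gif\taiwebs_005",
  ":aiwebs_006:\taiwebs_006.gif\taiwebs_006",
  ":aiwebs_007:\taiwebs_007.gif\taiwebs_007",
  ":aiwebs_008:\taiwebs_008.gif\taiwebs_008",
  ":aiwebs_009:\taiwebs_009.gif\taiwebs_009",
  ":aiwebs_010:\tflushed.png\tFlushed",
  ":aiwebs_011:\tgrin.png\tGrin",
  ":aiwebs_012:\taiwebs_012.gif\taiwebs_012",
  ":aiwebs_014:\trelieved.png\tRelieved",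
  ":aiwebs_015:\taiwebs_015.gif\taiwebs_015",
  ":aiwebs_016:\tanguished.png\tAnguished",
  ":aiwebs_017:\tsmile.png\tSmile",
  ":aiwebs_018:\ttriumph.png\tTriumph",
  ":aiwebs_019:\taiwebs_019.gif\taiwebs_019",
  ":aiwebs_020:\taiwebs_020.gif\taiwebs_020",
  ":aiwebs_021:\taiwebs_021.gif\taiwebs_021",
  ":aiwebs_022:\trelaxed.png\tRelaxed",
  ":aiwebs_023:\taiwebs_023.gif\taiwebs_023",
  ":aiwebs_024:\taiwebs_024.gif\taiwebs_024",
  ":aiwebs_025:\taiwebs_025.gif\taiwebs_025",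
  ":aiwebs_026:\taiwebs_026.gif\taiwebs_026",
  ":aiwebs_027:\taiwebs_027.gif\taiwebs_027",
  ":aiwebs_028:\tlaughing.png\tLaughing",
  ":aiwebs_029:\tconfounded.png\tConfounded",
  ":aiwebs_030:\taiwebs_030.gif\taiwebs_030",
  ":aiwebs_033:\tinnocent.png\tInnocent.png"]

-- Source B's 'code, img_file, alt = rec.split("\t")' (every record has exactly two tabs,
-- so the fallback arm is unreachable; Python would raise ValueError there)
def emojisAltParseRec (rec : List Char) : List Char × List Char × List Char :=
  match PySem.Chars.splitOn rec ['\t'] with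
  | [c, fn, al] => (c, fn, al)
  | _ => ([], [], [])

-- the img tag built by %-formatting in Source B
def emojisAltImg (fn al : List Char) : List Char :=
  "<img src=\"/static/img/emojis/".toList ++ fn ++ "\" class=\"emoji\" alt=\"".toList
    ++ al ++ "\">".toList

-- Source B's inner 'for p in text.split(code)' loop: img inserted before every non-first piece
def emojisAltInterleave (img : List Char) (parts : List (List Char)) : List (Bool × List Char) :=
  match parts with
  | [] => []
  | p :: rest => (true, p) :: rest.flatMap (fun q => [(false, img), (true, q)])

-- one pass of Source B's outer loop: raw segments are split by the code, frozen ones kept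
def emojisAltStep (code img : List Char) (segs : List (Bool × List Char)) :
    List (Bool × List Char) :=
  segs.flatMap (fun seg => if seg.1 then emojisAltInterleave img (PySem.Chars.splitOn seg.2 code) else [seg])

def emojis_alt (content : String) : String :=
  String.ofList (PySem.Chars.join []
    ((emojisAltRecords.foldl
        (fun segs rec =>
          let (c, fn, al) := emojisAltParseRec rec.toList
          emojisAltStep c (emojisAltImg fn al) segs)
        [(true, content.toList)]).map (fun seg => seg.2)))

-- ===== PRECONDITION & SPEC =====
def Spec_emojis (content : String) (out : String) : Prop := out = emojis_alt content
instance (content : String) (out : String) : Decidable (Spec_emojis content out) := by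
  unfold Spec_emojis; infer_instance

-- ===== CLAIM (what is proved, stated in full; the proofs are below) =====
def Claim_equal_emojis : Prop := ∀ (content : String), Dom_emojis content → Spec_emojis content (emojis content)

-- ===== LEMMAS AND PROOFS =====

-- B's parsed records are exactly the (code, file, alt) columns of A's table
set_option maxRecDepth 1000000 in
set_option maxHeartbeats 4000000 in
theorem parsedTable_eq :
    emojisAltRecords.map (fun rec => emojisAltParseRec rec.toList)
      = emojisSmilies.map (fun p => (p.2.1.toList, p.2.2.1.toList, p.2.2.2.toList)) := by
  decide

-- fuel-free form of PySem.Chars.replace's left-to-right scan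
def scanR (old new : List Char) : List Char → List Char
  | [] => []
  | c :: t =>
    if old.isPrefixOf (c :: t) && !old.isEmpty then
      new ++ scanR old new (t.drop (old.length - 1))
    else c :: scanR old new t
termination_by l => l.length
decreasing_by
  · simp
  · simp

-- fuel-free form of PySem.Chars.splitOn's scan
def splitSpec (sep : List Char) : List Char → List (List Char)
  | [] => [[]]
  | c :: t =>
    if sep.isPrefixOf (c :: t) && !sep.isEmpty then
      [] :: splitSpec sep (t.drop (sep.length - 1))
    else (splitSpec sep t).modifyHead (c :: ·)
termination_by l => l.length
decreasing_by
  · simp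
  · simp

def joinSegs (segs : List (Bool × List Char)) : List Char := (segs.map (fun seg => seg.2)).flatten

def allCodes : List (List Char) := emojisSmilies.map (fun p => p.2.1.toList)

-- an img-tag segment: starts '<', ends '>', contains no emoji code
def imgOk (im : List Char) : Bool :=
  im.head? == some '<' && im.getLast? == some '>' &&
  im.all (fun ch => !(ch == ':') && !(ch == ';')) &&
  !decide (['8', ')'] <:+: im) && !decide (['8', '-', ')'] <:+: im)

mutual
-- segment lists alternate raw, img, raw, ..., raw (first and last raw)
def altOk : List (Bool × List Char) → Bool
  | (true, _) :: rest => contOk rest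
  | _ => false
def contOk : List (Bool × List Char) → Bool
  | [] => true
  | (false, im) :: rest => imgOk im && altOk rest
  | _ => false
end

theorem altOk_nil : altOk [] = false := rfl
theorem altOk_true_cons (s : List Char) (rest : List (Bool × List Char)) :
    altOk ((true, s) :: rest) = contOk rest := rfl
theorem altOk_false_cons (s : List Char) (rest : List (Bool × List Char)) :
    altOk ((false, s) :: rest) = false := rfl
theorem contOk_nil : contOk [] = true := rfl
theorem contOk_true_cons (s : List Char) (rest : List (Bool × List Char)) :
    contOk ((true, s) :: rest) = false := rfl
theorem contOk_false_cons (im : List Char) (rest : List (Bool × List Char)) :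
    contOk ((false, im) :: rest) = (imgOk im && altOk rest) := rfl

theorem modifyHead_id_fun (l : List (List Char)) : l.modifyHead (fun x => x) = l := by
  cases l <;> simp [List.modifyHead]

theorem replace_go_spec (old new : List Char) (hne : old ≠ []) :
    ∀ (fuel : Nat) (l acc : List Char), l.length ≤ fuel →
      PySem.Chars.replace.go old new fuel l acc = acc.reverse ++ scanR old new l := by
  intro fuel
  induction fuel with
  | zero =>
    intro l acc hl
    have : l = [] := List.eq_nil_of_length_eq_zero (Nat.le_zero.mp hl)
    subst this
    simp [PySem.Chars.replace.go, scanR]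
  | succ n ih =>
    intro l acc hl
    cases l with
    | nil => simp [PySem.Chars.replace.go, scanR]
    | cons c t =>
      rw [PySem.Chars.replace.go]
      by_cases hp : old.isPrefixOf (c :: t)
      · have hk : 1 ≤ old.length := by
          cases old with
          | nil => exact absurd rfl hne
          | cons _ _ => simp
        have hdrop : List.drop old.length (c :: t) = t.drop (old.length - 1) := by
          cases old with
          | nil => exact absurd rfl hne
          | cons _ _ => simp
        have hlen : (t.drop (old.length - 1)).length ≤ n := by
          have := List.length_drop (l := t) (i := old.length - 1)
          simp at hl
          omega
        rw [if_pos hp, hdrop, ih _ _ hlen]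
        rw [scanR]
        simp [hp, List.isEmpty_eq_false_iff.mpr hne]
      · have hlen : t.length ≤ n := by simp at hl; omega
        rw [if_neg hp, ih _ _ hlen]
        rw [scanR]
        simp [hp]

theorem replace_eq_scanR (s old new : List Char) (hne : old ≠ []) :
    PySem.Chars.replace s old new = scanR old new s := by
  rw [PySem.Chars.replace]
  rw [if_neg (by simp [List.isEmpty_eq_false_iff.mpr hne])]
  simpa using replace_go_spec old new hne s.length s [] le_rfl

theorem splitOn_go_spec (sep : List Char) (hne : sep ≠ []) :
    ∀ (fuel : Nat) (l cur : List Char) (acc : List (List Char)), l.length < fuel →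
      PySem.Chars.splitOn.go sep fuel l cur acc
        = acc.reverse ++ (splitSpec sep l).modifyHead (cur.reverse ++ ·) := by
  intro fuel
  induction fuel with
  | zero => intro l cur acc hl; omega
  | succ n ih =>
    intro l cur acc hl
    cases l with
    | nil => simp [PySem.Chars.splitOn.go, splitSpec]
    | cons c t =>
      rw [PySem.Chars.splitOn.go]
      by_cases hp : sep.isPrefixOf (c :: t)
      · have hdrop : List.drop sep.length (c :: t) = t.drop (sep.length - 1) := by
          cases sep with
          | nil => exact absurd rfl hne
          | cons _ _ => simp
        have hlen : (t.drop (sep.length - 1)).length < n := by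
          have := List.length_drop (l := t) (i := sep.length - 1)
          have h1 : 1 ≤ sep.length := by
            cases sep with
            | nil => exact absurd rfl hne
            | cons _ _ => simp
          simp at hl
          omega
        rw [if_pos hp, hdrop, ih _ _ _ hlen]
        rw [splitSpec]
        simp [hp, List.isEmpty_eq_false_iff.mpr hne, modifyHead_id_fun]
      · have hlen : t.length < n := by simp at hl; omega
        rw [if_neg hp, ih _ _ _ hlen]
        rw [splitSpec]
        simp only [hp, Bool.false_and, if_neg, Bool.false_eq_true, not_false_iff]
        rcases splitSpec sep t with _ | ⟨h, tl⟩
        · simp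
        · simp [List.modifyHead]

theorem splitOn_eq_splitSpec (s sep : List Char) (hne : sep ≠ []) :
    PySem.Chars.splitOn s sep = splitSpec sep s := by
  rw [PySem.Chars.splitOn, splitOn_go_spec sep hne (s.length + 1) s [] [] (by omega)]
  rcases splitSpec sep s with _ | ⟨h, tl⟩
  · simp
  · simp [List.modifyHead]

theorem splitSpec_ne_nil (sep l : List Char) : splitSpec sep l ≠ [] := by
  induction l with
  | nil => simp [splitSpec]
  | cons c t ih =>
    rw [splitSpec]
    split
    · simp
    · rcases hs : splitSpec sep t with _ | ⟨h, tl⟩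
      · exact absurd hs ih
      · simp [List.modifyHead]

theorem intercalate_flatten (l : List (List Char)) : List.intercalate [] l = l.flatten := by
  induction l with
  | nil => rfl
  | cons a t ih => cases t <;> simp_all [List.intercalate, List.intersperse]

theorem intercalate_cons_ne_nil (b a : List Char) (l : List (List Char)) (h : l ≠ []) :
    b.intercalate (a :: l) = a ++ b ++ b.intercalate l := by
  cases l with
  | nil => simp at h
  | cons x t => simp [List.intercalate, List.intersperse]

theorem intercalate_modifyHead (b : List Char) (c : Char) (S : List (List Char)) (h : S ≠ []) :
    b.intercalate (S.modifyHead (c :: ·)) = c :: b.intercalate S := by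
  cases S with
  | nil => simp at h
  | cons a t =>
    cases t with
    | nil => simp [List.intercalate, List.modifyHead]
    | cons x r =>
      rw [List.modifyHead]
      rw [intercalate_cons_ne_nil b (c :: a) (x :: r) (by simp),
          intercalate_cons_ne_nil b a (x :: r) (by simp)]
      simp

theorem join_splitSpec (sep b l : List Char) (hne : sep ≠ []) :
    b.intercalate (splitSpec sep l) = scanR sep b l := by
  suffices h : ∀ (n : Nat) (l : List Char), l.length ≤ n →
      b.intercalate (splitSpec sep l) = scanR sep b l by
    exact h l.length l le_rfl
  intro n
  induction n with
  | zero =>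
    intro l hl
    have : l = [] := List.eq_nil_of_length_eq_zero (Nat.le_zero.mp hl)
    subst this
    simp [splitSpec, scanR, List.intercalate]
  | succ n ih =>
    intro l hl
    cases l with
    | nil => simp [splitSpec, scanR, List.intercalate]
    | cons c t =>
      rw [splitSpec, scanR]
      by_cases hp : (sep.isPrefixOf (c :: t) && !sep.isEmpty) = true
      · rw [if_pos hp, if_pos hp]
        have h1 : 1 ≤ sep.length := by
          cases sep with
          | nil => exact absurd rfl hne
          | cons _ _ => simp
        have hlen : (t.drop (sep.length - 1)).length ≤ n := by
          have := List.length_drop (l := t) (i := sep.length - 1)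
          simp at hl
          omega
        rw [intercalate_cons_ne_nil b [] _ (splitSpec_ne_nil sep _), ih _ hlen]
        simp
      · rw [if_neg hp, if_neg hp]
        have hlen : t.length ≤ n := by simp at hl; omega
        rw [intercalate_modifyHead b c _ (splitSpec_ne_nil sep t), ih _ hlen]

theorem interleave_join (b : List Char) (parts : List (List Char)) :
    joinSegs (emojisAltInterleave b parts) = b.intercalate parts := by
  cases parts with
  | nil => simp [emojisAltInterleave, joinSegs, List.intercalate]
  | cons p rest =>
    induction rest generalizing p with
    | nil => simp [emojisAltInterleave, joinSegs, List.intercalate]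
    | cons q rs ih =>
      have hstep : emojisAltInterleave b (p :: q :: rs)
          = (true, p) :: (false, b) :: emojisAltInterleave b (q :: rs) := by
        simp [emojisAltInterleave]
      rw [hstep, intercalate_cons_ne_nil b p (q :: rs) (by simp), ← ih q]
      simp [joinSegs]

theorem prefix_split (old su v : List Char) (h : old <+: su ++ v) (hlt : su.length < old.length) :
    su <+: old ∧ ∀ ch, v.head? = some ch → ch ∈ old := by
  have hsuo : su <+: old :=
    List.prefix_of_prefix_length_le (List.prefix_append su v) h (le_of_lt hlt)
  obtain ⟨t, ht⟩ := h
  refine ⟨hsuo, ?_⟩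
  intro ch hch
  have hd : old.drop su.length ++ t = v := by
    have h1 := congrArg (List.drop su.length) ht
    rw [List.drop_append_of_le_length (le_of_lt hlt)] at h1
    simpa using h1
  rcases hdrop : old.drop su.length with _ | ⟨a, r⟩
  · have : old.length - su.length = 0 := by
      have := List.length_drop (l := old) (i := su.length)
      rw [hdrop] at this
      simpa using this.symm
    omega
  · have hv : v = a :: (r ++ t) := by rw [← hd, hdrop]; simp
    have : a = ch := by rw [hv] at hch; simpa using hch
    subst this
    exact List.mem_of_mem_drop (hdrop ▸ List.mem_cons_self ..)

theorem scanR_append (old b u v : List Char) (hne : old ≠ [])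
    (H : ∀ su, su <:+ u → su ≠ [] → su.length < old.length → ¬ old <+: (su ++ v)) :
    scanR old b (u ++ v) = scanR old b u ++ scanR old b v := by
  suffices h : ∀ (n : Nat) (u : List Char), u.length ≤ n →
      (∀ su, su <:+ u → su ≠ [] → su.length < old.length → ¬ old <+: (su ++ v)) →
      scanR old b (u ++ v) = scanR old b u ++ scanR old b v by
    exact h u.length u le_rfl H
  clear H u
  intro n
  induction n with
  | zero =>
    intro u hu _
    have : u = [] := List.eq_nil_of_length_eq_zero (Nat.le_zero.mp hu)
    subst this
    simp [scanR]
  | succ n ih =>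
    intro u hu H
    cases u with
    | nil => simp [scanR]
    | cons c t =>
      have hk : 1 ≤ old.length := by
        cases old with
        | nil => exact absurd rfl hne
        | cons _ _ => simp
      by_cases hp : old.isPrefixOf (c :: t)
      · have hp2 : old <+: (c :: t) := List.isPrefixOf_iff_prefix.mp hp
        have hp3 : old.isPrefixOf ((c :: t) ++ v) :=
          List.isPrefixOf_iff_prefix.mpr (hp2.trans (List.prefix_append _ _))
        have hcond : (old.isPrefixOf (c :: t) && !old.isEmpty) = true := by
          simp [hp, List.isEmpty_eq_false_iff.mpr hne]
        have hcond2 : (old.isPrefixOf (c :: (t ++ v)) && !old.isEmpty) = true := by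
          simpa [List.isEmpty_eq_false_iff.mpr hne] using hp3
        have hklen : old.length - 1 ≤ t.length := by
          have := hp2.length_le
          simp at this
          omega
        have hdrop : (t ++ v).drop (old.length - 1) = t.drop (old.length - 1) ++ v :=
          List.drop_append_of_le_length hklen
        rw [List.cons_append, scanR, if_pos hcond2, scanR, if_pos hcond, hdrop]
        have hlen : (t.drop (old.length - 1)).length ≤ n := by
          have := List.length_drop (l := t) (i := old.length - 1)
          simp at hu
          omega
        have Hsub : ∀ su, su <:+ t.drop (old.length - 1) → su ≠ [] →
            su.length < old.length → ¬ old <+: (su ++ v) := by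
          intro su hsu hne2 hlt2
          exact H su (hsu.trans ((List.drop_suffix _ _).trans (List.suffix_cons c t))) hne2 hlt2
        rw [ih _ hlen Hsub]
        simp
      · have hnp : ¬ old <+: ((c :: t) ++ v) := by
          intro hcon
          by_cases hkle : old.length ≤ (c :: t).length
          · have heq : old = ((c :: t) ++ v).take old.length := List.prefix_iff_eq_take.mp hcon
            rw [List.take_append_of_le_length hkle] at heq
            exact hp (List.isPrefixOf_iff_prefix.mpr (heq ▸ List.take_prefix _ _))
          · exact H (c :: t) (List.suffix_refl _) (by simp) (by omega) hcon
        have hcond : (old.isPrefixOf (c :: t) && !old.isEmpty) = false := by simp [hp]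
        have hnp2 : ¬ old <+: (c :: (t ++ v)) := by simpa using hnp
        have hcond2 : (old.isPrefixOf (c :: (t ++ v)) && !old.isEmpty) = false := by
          have hx : old.isPrefixOf (c :: (t ++ v)) = false := by
            rw [Bool.eq_false_iff]
            intro hcon
            exact hnp2 (List.isPrefixOf_iff_prefix.mp hcon)
          simp [hx]
        have hlen : t.length ≤ n := by simp at hu; omega
        have Hsub : ∀ su, su <:+ t → su ≠ [] → su.length < old.length → ¬ old <+: (su ++ v) := by
          intro su hsu hne2 hlt2
          exact H su (hsu.trans (List.suffix_cons c t)) hne2 hlt2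
        rw [List.cons_append, scanR, if_neg (by simp [hcond2]), scanR, if_neg (by simp [hcond]),
          ih _ hlen Hsub]
        simp

theorem scanR_eq_self (old b l : List Char) (h : ¬ old <:+: l) :
    scanR old b l = l := by
  induction l with
  | nil => simp [scanR]
  | cons c t ih =>
    rw [scanR]
    have hnp : ¬ old.isPrefixOf (c :: t) = true := by
      intro hcon
      exact h (List.isPrefixOf_iff_prefix.mp hcon).isInfix
    rw [if_neg (by simp [hnp])]
    rw [ih (fun hcon => h (List.infix_cons hcon))]

set_option maxRecDepth 100000 in
theorem codeShape : ∀ c ∈ allCodes,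
    (':' : Char) ∈ c ∨ (';' : Char) ∈ c ∨ c = ['8', ')'] ∨ c = ['8', '-', ')'] := by
  decide

theorem imgOk_not_infix (im : List Char) (h : imgOk im = true) :
    ∀ c ∈ allCodes, ¬ c <:+: im := by
  intro c hc hinf
  simp only [imgOk, Bool.and_eq_true, beq_iff_eq, Bool.not_eq_true', decide_eq_false_iff_not,
    List.all_eq_true] at h
  obtain ⟨⟨⟨⟨hh, hl⟩, hall⟩, h8⟩, h83⟩ := h
  rcases codeShape c hc with hch | hch | rfl | rfl
  · have h2 := hall _ (hinf.subset hch)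
    simp at h2
  · have h2 := hall _ (hinf.subset hch)
    simp at h2
  · exact h8 hinf
  · exact h83 hinf

theorem stepJoin (c b : List Char) (hc : c ≠ []) (hcA : c ∈ allCodes)
    (hlt : ('<' : Char) ∉ c) (hgt : ('>' : Char) ∉ c) :
    ∀ segs, altOk segs = true →
      scanR c b (joinSegs segs) = joinSegs (emojisAltStep c b segs) := by
  suffices h : ∀ (n : Nat) (segs : List (Bool × List Char)), segs.length ≤ n →
      altOk segs = true → scanR c b (joinSegs segs) = joinSegs (emojisAltStep c b segs) by
    exact fun segs => h segs.length segs le_rfl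
  intro n
  induction n with
  | zero =>
    intro segs hlen hA
    have : segs = [] := List.eq_nil_of_length_eq_zero (Nat.le_zero.mp hlen)
    subst this
    simp [altOk_nil] at hA
  | succ n ih =>
    intro segs hlen hA
    rcases segs with _ | ⟨⟨b1, s⟩, rest⟩
    · simp [altOk_nil] at hA
    · cases b1
      · simp [altOk_false_cons] at hA
      · have hcont : contOk rest = true := by simpa [altOk_true_cons] using hA
        have hraw : scanR c b s = joinSegs (emojisAltInterleave b (PySem.Chars.splitOn s c)) := by
          rw [interleave_join, splitOn_eq_splitSpec s c hc, join_splitSpec c b s hc]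
        rcases rest with _ | ⟨⟨b2, im⟩, rest2⟩
        · have : joinSegs [((true : Bool), s)] = s ++ [] := by simp [joinSegs]
          rw [this]
          have hH : ∀ su, su <:+ s → su ≠ [] → su.length < c.length → ¬ c <+: (su ++ ([] : List Char)) := by
            intro su hsu hne2 hlt2 hcon
            rw [List.append_nil] at hcon
            have := hcon.length_le
            omega
          rw [scanR_append c b s [] hc hH]
          have hstep1 : emojisAltStep c b [((true : Bool), s)]
              = emojisAltInterleave b (PySem.Chars.splitOn s c) ++ [] := by
            simp [emojisAltStep]
          rw [hstep1]
          rw [show scanR c b ([] : List Char) = [] from by simp [scanR]]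
          simp only [List.append_nil]
          rw [hraw]
        · cases b2
          · have himg : imgOk im = true := by
              rw [contOk_false_cons] at hcont; simp only [Bool.and_eq_true] at hcont
              exact hcont.1
            have hA2 : altOk rest2 = true := by
              rw [contOk_false_cons] at hcont; simp only [Bool.and_eq_true] at hcont
              exact hcont.2
            simp only [imgOk, Bool.and_eq_true, beq_iff_eq] at himg
            have hhead : im.head? = some '<' := himg.1.1.1.1
            have hlast : im.getLast? = some '>' := himg.1.1.1.2
            have himne : im ≠ [] := by
              intro hx; rw [hx] at hhead; simp at hhead
            have hinf : ¬ c <:+: im := imgOk_not_infix im (by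
              simp only [imgOk, Bool.and_eq_true, beq_iff_eq]
              exact himg) c hcA
            have hJ : joinSegs (((true : Bool), s) :: ((false : Bool), im) :: rest2)
                = s ++ (im ++ joinSegs rest2) := by simp [joinSegs]
            rw [hJ]
            have hH1 : ∀ su, su <:+ s → su ≠ [] → su.length < c.length →
                ¬ c <+: (su ++ (im ++ joinSegs rest2)) := by
              intro su _ _ hlt2 hcon
              have := (prefix_split c su _ hcon hlt2).2 '<' (by
                rcases im with _ | ⟨a, r⟩
                · exact absurd rfl himne
                · simp at hhead
                  simp [hhead])
              exact hlt this
            rw [scanR_append c b s _ hc hH1]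
            have hH2 : ∀ su, su <:+ im → su ≠ [] → su.length < c.length →
                ¬ c <+: (su ++ joinSegs rest2) := by
              intro su hsu hne2 hlt2 hcon
              have hps := prefix_split c su _ hcon hlt2
              have hgl : su.getLast? = some '>' := by
                obtain ⟨p, rfl⟩ := hsu
                rw [← hlast, List.getLast?_append_of_ne_nil p hne2]
              have : ('>' : Char) ∈ su := List.mem_of_getLast? hgl
              exact hgt (hps.1.mem this)
            rw [scanR_append c b im _ hc hH2]
            rw [scanR_eq_self c b im hinf]
            have hlen2 : rest2.length ≤ n := by simp at hlen; omega
            rw [ih rest2 hlen2 hA2, hraw]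
            simp [emojisAltStep, joinSegs]
          · simp [contOk_true_cons] at hcont

theorem altOk_interleave_append (b : List Char) (hb : imgOk b = true) :
    ∀ (parts : List (List Char)) (rest : List (Bool × List Char)),
      parts ≠ [] → contOk rest = true → altOk (emojisAltInterleave b parts ++ rest) = true := by
  intro parts
  induction parts with
  | nil => intro rest h; exact absurd rfl h
  | cons p ps ih =>
    intro rest _ hrest
    cases ps with
    | nil =>
      simp only [emojisAltInterleave, List.flatMap_nil, List.nil_append, List.cons_append]
      simpa [altOk] using hrest
    | cons q rs =>
      have hstep : emojisAltInterleave b (p :: q :: rs)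
          = (true, p) :: (false, b) :: emojisAltInterleave b (q :: rs) := by
        simp [emojisAltInterleave]
      rw [hstep]
      have := ih rest (by simp) hrest
      simp only [List.cons_append, altOk, contOk, Bool.and_eq_true]
      exact ⟨hb, this⟩

theorem altOk_step (c b : List Char) (hc : c ≠ []) (hb : imgOk b = true) :
    ∀ segs, altOk segs = true → altOk (emojisAltStep c b segs) = true := by
  suffices h : ∀ (n : Nat) (segs : List (Bool × List Char)), segs.length ≤ n →
      altOk segs = true → altOk (emojisAltStep c b segs) = true by
    exact fun segs => h segs.length segs le_rfl
  intro n
  induction n with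
  | zero =>
    intro segs hlen hA
    have : segs = [] := List.eq_nil_of_length_eq_zero (Nat.le_zero.mp hlen)
    subst this
    simp [altOk_nil] at hA
  | succ n ih =>
    intro segs hlen hA
    rcases segs with _ | ⟨⟨b1, s⟩, rest⟩
    · simp [altOk_nil] at hA
    · cases b1
      · simp [altOk_false_cons] at hA
      · have hcont : contOk rest = true := by simpa [altOk_true_cons] using hA
        have hne : PySem.Chars.splitOn s c ≠ [] := by
          rw [splitOn_eq_splitSpec s c hc]
          exact splitSpec_ne_nil c s
        rcases rest with _ | ⟨⟨b2, im⟩, rest2⟩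
        · simp only [emojisAltStep, List.flatMap_cons, List.flatMap_nil]
          rw [List.append_nil]
          have := altOk_interleave_append b hb (PySem.Chars.splitOn s c) [] hne (by simp [contOk_nil])
          simpa using this
        · cases b2
          · have himg : imgOk im = true := by
              rw [contOk_false_cons] at hcont; simp only [Bool.and_eq_true] at hcont
              exact hcont.1
            have hA2 : altOk rest2 = true := by
              rw [contOk_false_cons] at hcont; simp only [Bool.and_eq_true] at hcont
              exact hcont.2
            have hlen2 : rest2.length ≤ n := by simp at hlen; omega
            have hrec := ih rest2 hlen2 hA2
            have hstep : emojisAltStep c b (((true : Bool), s) :: ((false : Bool), im) :: rest2)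
                = emojisAltInterleave b (PySem.Chars.splitOn s c)
                  ++ ((false, im) :: emojisAltStep c b rest2) := by
              simp [emojisAltStep]
            rw [hstep]
            exact altOk_interleave_append b hb _ _ hne (by
              rw [contOk_false_cons]
              simp only [Bool.and_eq_true]
              exact ⟨himg, hrec⟩)
          · simp [contOk_true_cons] at hcont

set_option maxRecDepth 100000 in
theorem factCodes : ∀ p ∈ emojisSmilies,
    p.2.1.toList ≠ [] ∧ ('<' : Char) ∉ p.2.1.toList ∧ ('>' : Char) ∉ p.2.1.toList := by
  decide

set_option maxRecDepth 100000 in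
set_option maxHeartbeats 2000000 in
theorem factImgs : ∀ p ∈ emojisSmilies,
    imgOk (emojisAltImg p.2.2.1.toList p.2.2.2.toList) = true := by
  decide

theorem masterFold :
    ∀ (packs : List (Int × String × String × String)) (segs : List (Bool × List Char)),
      altOk segs = true → (∀ p ∈ packs, p ∈ emojisSmilies) →
      packs.foldl
          (fun cs p => PySem.Chars.replace cs p.2.1.toList (emojisAltImg p.2.2.1.toList p.2.2.2.toList))
          (joinSegs segs)
        = joinSegs (packs.foldl
            (fun segs p => emojisAltStep p.2.1.toList (emojisAltImg p.2.2.1.toList p.2.2.2.toList) segs) segs) := by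
  intro packs
  induction packs with
  | nil => intro segs _ _; rfl
  | cons p ps ih =>
    intro segs hA hmem
    have hp : p ∈ emojisSmilies := hmem p List.mem_cons_self
    obtain ⟨hcne, hclt, hcgt⟩ := factCodes p hp
    have hb : imgOk (emojisAltImg p.2.2.1.toList p.2.2.2.toList) = true := factImgs p hp
    have hcA : p.2.1.toList ∈ allCodes := List.mem_map_of_mem hp
    simp only [List.foldl_cons]
    rw [replace_eq_scanR (joinSegs segs) p.2.1.toList _ hcne,
      stepJoin p.2.1.toList _ hcne hcA hclt hcgt segs hA]
    exact ih _ (altOk_step p.2.1.toList _ hcne hb segs hA)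
      (fun q hq => hmem q (List.mem_cons_of_mem p hq))

theorem toList_foldl_replace :
    ∀ (packs : List (Int × String × String × String)) (s : String),
      (packs.foldl (fun c pack => PySem.Str.replace c pack.2.1 (emojisImgUrl pack.2.2.1 pack.2.2.2)) s).toList
        = packs.foldl (fun cs p => PySem.Chars.replace cs p.2.1.toList (emojisAltImg p.2.2.1.toList p.2.2.2.toList)) s.toList := by
  intro packs
  induction packs with
  | nil => intro s; rfl
  | cons p ps ih =>
    intro s
    simp only [List.foldl_cons]
    rw [ih, PySem.Str.toList_replace]
    have himg : (emojisImgUrl p.2.2.1 p.2.2.2).toList = emojisAltImg p.2.2.1.toList p.2.2.2.toList := by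
      simp [emojisImgUrl, emojisAltImg, String.toList_append]
    rw [himg]

-- folding after mapping, proved by hand to avoid higher-order matching
theorem foldl_over_map {α β γ : Type} (f : β → γ) (g : α → γ → α) :
    ∀ (l : List β) (init : α), l.foldl (fun a b => g a (f b)) init = (l.map f).foldl g init := by
  intro l
  induction l with
  | nil => intro init; rfl
  | cons x t ih => intro init; simp only [List.foldl_cons, List.map_cons]; exact ih _

-- B's fold over parsed records = the same fold over A's table columns
theorem fold_recs_eq (init : List (Bool × List Char)) :
    emojisAltRecords.foldl
        (fun segs rec =>
          let (c, fn, al) := emojisAltParseRec rec.toList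
          emojisAltStep c (emojisAltImg fn al) segs) init
      = emojisSmilies.foldl
          (fun segs p => emojisAltStep p.2.1.toList (emojisAltImg p.2.2.1.toList p.2.2.2.toList) segs) init := by
  have hfun : (fun (segs : List (Bool × List Char)) (rec : String) =>
      let (c, fn, al) := emojisAltParseRec rec.toList
      emojisAltStep c (emojisAltImg fn al) segs)
      = fun segs rec =>
          (fun (segs : List (Bool × List Char)) (t : List Char × List Char × List Char) =>
            emojisAltStep t.1 (emojisAltImg t.2.1 t.2.2) segs) segs (emojisAltParseRec rec.toList) := by
    funext segs rec
    rcases emojisAltParseRec rec.toList with ⟨c, fn, al⟩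
    rfl
  rw [hfun,
    foldl_over_map (fun rec => emojisAltParseRec rec.toList)
      (fun segs t => emojisAltStep t.1 (emojisAltImg t.2.1 t.2.2) segs) emojisAltRecords init,
    parsedTable_eq,
    ← foldl_over_map (fun p => (p.2.1.toList, p.2.2.1.toList, p.2.2.2.toList))
      (fun segs t => emojisAltStep t.1 (emojisAltImg t.2.1 t.2.2) segs) emojisSmilies init]

-- ===== VERDICT (by name: the statement is the Claim_ definition above) =====
theorem emojis_spec : Claim_equal_emojis := by
  intro content _
  show emojis content = emojis_alt content
  apply String.ext_iff.mpr
  rw [emojis, toList_foldl_replace]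
  have hstart : content.toList = joinSegs [((true : Bool), content.toList)] := by
    simp [joinSegs]
  rw [hstart, masterFold emojisSmilies [((true : Bool), content.toList)]
    (by simp [altOk_true_cons, contOk_nil]) (fun q hq => hq)]
  rw [emojis_alt, fold_recs_eq]
  simp only [String.toList_ofList]
  rw [PySem.Chars.join]
  rw [intercalate_flatten]
  simp [joinSegs]
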